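-- pv_equiv track=rewrite | github.com/NIDHISH99444/DataStructures | DynamicProgrammingAdityaVerma/interviewBit/tusharBithday.py | solve
-- ===== SOURCE A (Python) =====
-- def solve( R, A):
--     smallest = float('inf')
--     k = 0
--     for i in range(len(A)):
--         if A[i] < smallest:
--             smallest = A[i]
--             k = i
--     tolerance = R % smallest
--     res = [k] * (R // smallest)
--     i = 0
--     j = 0
--     while j < k and i < len(res):
--         if A[j] - smallest <= tolerance:
--             res[i] = j
--             tolerance -= A[j] - smallest
--             i += 1
--         else:
--             j += 1
--     return res
-- ===== SOURCE B (Python) =====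
-- def solve(R, A):
--     m = min(A)
--     k = A.index(m)
--     tolerance = R % m
--     n = R // m
--     out = []
--     i = 0
--     for j in range(k):
--         if i >= n:
--             break
--         d = A[j] - m
--         if d <= tolerance:
--             c = min(tolerance // d, n - i)
--             out.extend([j] * c)
--             tolerance -= c * d
--             i += c
--     out.extend([k] * (n - i))
--     return out
-- ===== Notes on version B (the rewrite author's own statement) =====
-- stated objective: alternative
-- what changed: B uses min()/index() instead of A's manual scan and replaces A's one-placement-per-iteration two-pointer while loop by a single batched step per candidate index j (count = min(tolerance//d, slots left), one extend and one subtraction), building the output by appending instead of overwriting a preallocated list.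
-- outside the precondition, e.g. on solve(5, []): A raises TypeError, B raises ValueError; on solve(5, [0, 3]): A raises ZeroDivisionError, B raises ZeroDivisionError
import Mathlib
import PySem

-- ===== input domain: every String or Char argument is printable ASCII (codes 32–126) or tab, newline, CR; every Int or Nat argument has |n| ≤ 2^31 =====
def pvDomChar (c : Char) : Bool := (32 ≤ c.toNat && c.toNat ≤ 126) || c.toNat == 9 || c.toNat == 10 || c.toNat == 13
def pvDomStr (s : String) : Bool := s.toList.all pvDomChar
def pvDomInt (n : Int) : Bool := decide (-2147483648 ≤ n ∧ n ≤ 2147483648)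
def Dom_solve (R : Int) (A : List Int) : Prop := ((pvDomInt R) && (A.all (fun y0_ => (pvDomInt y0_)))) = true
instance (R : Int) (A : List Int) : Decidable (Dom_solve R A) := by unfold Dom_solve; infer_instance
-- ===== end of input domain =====

-- B replaces A's one-unit-at-a-time two-pointer fill by min/index plus one batched
-- arithmetic step per candidate index (alternative decomposition, same exact output).

-- ===== PORT A =====
-- the 'for i in range(len(A))' min scan; smallest = none plays float('inf')
def scanA : List Int → Nat → Option Int → Nat → Option Int × Nat
  | [], _, s?, k => (s?, k)
  | a :: t, i, s?, k =>
    match s? with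
    | none => scanA t (i + 1) (some a) i
    | some s => if a < s then scanA t (i + 1) (some a) i else scanA t (i + 1) (some s) k

-- the 'while j < k and i < len(res)' loop; A.getD j 0 is exact for A[j] since 0 ≤ j < k < len A
def loopA (A : List Int) (s : Int) (k : Nat) (i j : Nat) (tol : Int) (res : List Int) : List Int :=
  if h : j < k ∧ i < res.length then
    let d := A.getD j 0 - s
    if d ≤ tol then loopA A s k (i + 1) j (tol - d) (res.set i (j : Int))
    else loopA A s k i (j + 1) tol res
  else res
termination_by (k - j) + (res.length - i)
decreasing_by
· simp only [List.length_set]; omega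
· omega

def solve (R : Int) (A : List Int) : List Int :=
  match scanA A 0 none 0 with
  | (none, _) => []   -- A = []: Python raises TypeError on [k] * (R // inf); excluded by Pre_solve
  | (some s, k) =>
    let tolerance := PySem.Int.mod R s   -- R % smallest (raises iff smallest = 0; excluded by Pre_solve)
    let res := List.replicate (PySem.Int.floordiv R s).toNat (k : Int)   -- [k] * (R // smallest)
    loopA A s k 0 0 tolerance res

-- ===== PORT B =====
-- the 'for j in range(k)' loop with break; per j one batched placement of c copies
def loopB (A : List Int) (m : Int) (k : Nat) (n : Int) (j : Nat) (i tol : Int)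
    (acc : List Int) : List Int × Int :=
  if h : j < k then
    if n ≤ i then (acc, i)   -- 'if i >= n: break'
    else
      let d := A.getD j 0 - m   -- exact for A[j]: 0 ≤ j < k < len A
      if d ≤ tol then
        let c := min (PySem.Int.floordiv tol d) (n - i)
        loopB A m k n (j + 1) (i + c) (tol - c * d) (acc ++ List.replicate c.toNat (j : Int))
      else loopB A m k n (j + 1) i tol acc
  else (acc, i)
termination_by k - j

def solve_alt (R : Int) (A : List Int) : List Int :=
  match PySem.List.min? A (fun x => x) with
  | none => []   -- min([]) raises ValueError; excluded by Pre_solve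
  | some m =>
    let k := (PySem.List.index? A m).getD 0   -- A.index(m); m ∈ A so index? is some
    let tolerance := PySem.Int.mod R m   -- R % m (raises iff m = 0; excluded by Pre_solve)
    let n := PySem.Int.floordiv R m
    let r := loopB A m k n 0 0 tolerance []
    r.1 ++ List.replicate (n - r.2).toNat (k : Int)   -- out.extend([k] * (n - i))

-- ===== PRECONDITION & SPEC =====
-- Pre_ excludes exactly the inputs where A raises: empty A (TypeError on [k] * (R // inf))
-- and min(A) = 0 (ZeroDivisionError on R % 0).
def Pre_solve (R : Int) (A : List Int) : Prop :=
  A ≠ [] ∧ ¬((0 : Int) ∈ A ∧ ∀ x ∈ A, 0 ≤ x)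
instance (R : Int) (A : List Int) : Decidable (Pre_solve R A) := by
  unfold Pre_solve; infer_instance

def pvWitness_solve : Int × List Int := (47, [8, 5, 3, 2])

def Spec_solve (R : Int) (A : List Int) (out : List Int) : Prop := out = solve_alt R A
instance (R : Int) (A : List Int) (out : List Int) : Decidable (Spec_solve R A out) := by
  unfold Spec_solve; infer_instance

-- ===== CLAIM (what is proved, stated in full; the proofs are below) =====
def Claim_equal_solve : Prop :=
  ∀ (R : Int) (A : List Int), Dom_solve R A → Pre_solve R A → Spec_solve R A (solve R A)

-- ===== LEMMAS AND PROOFS =====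

-- the single-step functional core both loops compute (proof device only)
def fspec (A : List Int) (s : Int) (k : Nat) (j : Nat) (tol : Int) (rem : Nat) : List Int :=
  if h : j < k ∧ 0 < rem then
    let d := A.getD j 0 - s
    if d ≤ tol then (j : Int) :: fspec A s k j (tol - d) (rem - 1)
    else fspec A s k (j + 1) tol rem
  else List.replicate rem (k : Int)
termination_by (k - j) + rem
decreasing_by all_goals omega

lemma scanA_cons_some (a : Int) (t : List Int) (i0 : Nat) (s : Int) (k : Nat) :
    scanA (a :: t) i0 (some s) k =
      if a < s then scanA t (i0 + 1) (some a) i0 else scanA t (i0 + 1) (some s) k := rfl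

lemma scanA_spec (t : List Int) : ∀ (i0 k : Nat) (s : Int),
    (scanA t i0 (some s) k).1 = some (t.foldl min s) ∧
    ((t.foldl min s = s ∧ (scanA t i0 (some s) k).2 = k) ∨
     (∃ p, p < t.length ∧ (scanA t i0 (some s) k).2 = i0 + p ∧
        t.getD p 0 = t.foldl min s ∧ t.foldl min s < s ∧
        ∀ q, q < p → t.foldl min s < t.getD q 0)) := by
  induction t with
  | nil => intro i0 k s; exact ⟨rfl, Or.inl ⟨rfl, rfl⟩⟩
  | cons a t ih =>
    intro i0 k s
    rw [scanA_cons_some]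
    have hf : List.foldl min s (a :: t) = List.foldl min (min s a) t := rfl
    by_cases hlt : a < s
    · rw [if_pos hlt, hf, min_eq_right hlt.le]
      obtain ⟨h1, h2⟩ := ih (i0 + 1) i0 a
      refine ⟨h1, Or.inr ?_⟩
      rcases h2 with ⟨heq, hk⟩ | ⟨p, hp, hk, hgd, hlt2, hall⟩
      · exact ⟨0, by simp, by omega, by simp [heq], by rw [heq]; exact hlt,
          fun q hq => absurd hq (Nat.not_lt_zero q)⟩
      · refine ⟨p + 1, by simp; omega, by omega, by simpa using hgd, lt_trans hlt2 hlt, ?_⟩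
        intro q hq
        cases q with
        | zero => simpa using hlt2
        | succ q => simpa using hall q (by omega)
    · rw [if_neg hlt, hf, min_eq_left (not_lt.mp hlt)]
      obtain ⟨h1, h2⟩ := ih (i0 + 1) k s
      refine ⟨h1, ?_⟩
      rcases h2 with ⟨heq, hk⟩ | ⟨p, hp, hk, hgd, hlt2, hall⟩
      · exact Or.inl ⟨heq, hk⟩
      · refine Or.inr ⟨p + 1, by simp; omega, by omega, by simpa using hgd, hlt2, ?_⟩
        intro q hq
        cases q with
        | zero => simpa using lt_of_lt_of_le hlt2 (not_lt.mp hlt)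
        | succ q => simpa using hall q (by omega)

lemma scan_props (a : Int) (t : List Int) :
    ∃ k, scanA (a :: t) 0 none 0 = (some (t.foldl min a), k) ∧ k < (a :: t).length ∧
      (a :: t).getD k 0 = t.foldl min a ∧
      ∀ j, j < k → t.foldl min a < (a :: t).getD j 0 := by
  have hstep : scanA (a :: t) 0 none 0 = scanA t 1 (some a) 0 := rfl
  obtain ⟨h1, h2⟩ := scanA_spec t 1 0 a
  rcases h2 with ⟨heq, hk⟩ | ⟨p, hp, hk, hgd, hlt2, hall⟩
  · refine ⟨0, ?_, by simp, by simpa using heq.symm, fun j hj => absurd hj (Nat.not_lt_zero j)⟩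
    rw [hstep]
    exact Prod.ext h1 hk
  · refine ⟨1 + p, ?_, by simp; omega, ?_, ?_⟩
    · rw [hstep]; exact Prod.ext h1 hk
    · have : 1 + p = p + 1 := by omega
      rw [this]; simpa using hgd
    · intro j hj
      cases j with
      | zero => simpa using hlt2
      | succ j => simpa using hall j (by omega)

lemma index?_first : ∀ (A : List Int) (v : Int) (k : Nat), k < A.length →
    A.getD k 0 = v → (∀ j, j < k → A.getD j 0 ≠ v) → PySem.List.index? A v = some k := by
  intro A
  induction A with
  | nil => intro v k hk; simp at hk
  | cons a t ih =>
    intro v k hk hv hpre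
    cases k with
    | zero =>
      simp at hv
      rw [hv]
      exact PySem.List.index?_cons_self v t
    | succ k =>
      have hne : a ≠ v := by simpa using hpre 0 (by omega)
      rw [PySem.List.index?_cons_of_ne t hne,
        ih v k (by simpa using hk) (by simpa using hv)
          (fun j hj => by simpa using hpre (j + 1) (by omega))]
      rfl

lemma set_pref_replicate (pref : List Int) (rem : Nat) (x y : Int) (hrem : 0 < rem) :
    (pref ++ List.replicate rem x).set pref.length y
      = (pref ++ [y]) ++ List.replicate (rem - 1) x := by
  induction pref with
  | nil =>
    cases rem with
    | zero => omega
    | succ rem => simp [List.replicate_succ]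
  | cons p pref ih => simpa using ih

lemma loopA_eq_f (A : List Int) (s : Int) (k : Nat) :
    ∀ (N j : Nat) (tol : Int) (rem : Nat) (pref : List Int), (k - j) + rem ≤ N →
      loopA A s k pref.length j tol (pref ++ List.replicate rem (k : Int))
        = pref ++ fspec A s k j tol rem := by
  intro N
  induction N with
  | zero =>
    intro j tol rem pref hN
    have hjk : ¬ j < k := by omega
    have hrem : rem = 0 := by omega
    rw [loopA, fspec]
    simp [hjk, hrem]
  | succ N ih =>
    intro j tol rem pref hN
    rw [loopA, fspec]
    have hlen : (pref ++ List.replicate rem (k : Int)).length = pref.length + rem := by simp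
    by_cases hc : j < k ∧ 0 < rem
    · have hc' : j < k ∧ pref.length < (pref ++ List.replicate rem (k : Int)).length := by
        rw [hlen]; omega
      rw [dif_pos hc', dif_pos hc]
      by_cases hd : A.getD j 0 - s ≤ tol
      · rw [if_pos hd, if_pos hd]
        rw [set_pref_replicate pref rem _ _ hc.2]
        have hl : pref.length + 1 = (pref ++ [(j : Int)]).length := by simp
        rw [hl, ih j _ (rem - 1) (pref ++ [(j : Int)]) (by omega)]
        simp
      · rw [if_neg hd, if_neg hd]
        exact ih (j + 1) tol rem pref (by omega)
    · have hc' : ¬ (j < k ∧ pref.length < (pref ++ List.replicate rem (k : Int)).length) := by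
        rw [hlen]; omega
      rw [dif_neg hc', dif_neg hc]

lemma floordiv_sub_self (tol d : Int) (hd : 0 < d) :
    PySem.Int.floordiv (tol - d) d = PySem.Int.floordiv tol d - 1 := by
  rw [PySem.Int.floordiv_eq_ediv_of_pos hd, PySem.Int.floordiv_eq_ediv_of_pos hd]
  have h : tol - d = tol + (-1) * d := by ring
  rw [h, Int.add_mul_ediv_right _ _ (by omega : d ≠ 0)]
  omega

lemma fspec_zero (A : List Int) (s : Int) (k : Nat) (j : Nat) (tol : Int) :
    fspec A s k j tol 0 = [] := by
  rw [fspec]; simp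

lemma fspec_batch (A : List Int) (s : Int) (k : Nat) :
    ∀ (rem : Nat) (j : Nat) (tol : Int), j < k → 0 < rem → 0 ≤ tol →
      1 ≤ A.getD j 0 - s →
      fspec A s k j tol rem =
        List.replicate (min (PySem.Int.floordiv tol (A.getD j 0 - s)) (rem : Int)).toNat (j : Int)
          ++ fspec A s k (j + 1)
              (tol - (min (PySem.Int.floordiv tol (A.getD j 0 - s)) (rem : Int)) * (A.getD j 0 - s))
              (rem - (min (PySem.Int.floordiv tol (A.getD j 0 - s)) (rem : Int)).toNat) := by
  intro rem
  induction rem with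
  | zero => intro j tol hjk hrem; omega
  | succ rem ih =>
    intro j tol hjk hrem htol hd1
    set d := A.getD j 0 - s with hdref
    have hdpos : 0 < d := by omega
    by_cases hd : d ≤ tol
    · have hfd1 : 1 ≤ PySem.Int.floordiv tol d := by
        rw [PySem.Int.le_floordiv_iff_mul_le hdpos]; omega
      have hstep : fspec A s k j tol (rem + 1) = (j : Int) :: fspec A s k j (tol - d) rem := by
        rw [fspec]
        simp only [← hdref]
        rw [dif_pos ⟨hjk, by omega⟩, if_pos hd]
        simp
      rw [hstep]
      simp only [Nat.cast_add, Nat.cast_one]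
      set c := min (PySem.Int.floordiv tol d) ((rem : Int) + 1) with hc
      have hc1 : 1 ≤ c := by omega
      rcases Nat.eq_zero_or_pos rem with hr0 | hrpos
      · -- last slot: exactly one placement
        subst hr0
        have hcv : c = 1 := by rw [hc]; omega
        rw [fspec_zero, hcv]
        norm_num [fspec_zero]
      · have hIH := ih j (tol - d) hjk hrpos (by omega) hd1
        rw [hIH]
        have hfds : PySem.Int.floordiv (tol - d) d = PySem.Int.floordiv tol d - 1 :=
          floordiv_sub_self tol d hdpos
        set c' := min (PySem.Int.floordiv (tol - d) d) ((rem : Int)) with hc'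
        have hcc : c' = c - 1 := by rw [hc', hfds, hc]; omega
        have hrepl : List.replicate c.toNat (j : Int)
            = (j : Int) :: List.replicate c'.toNat (j : Int) := by
          have h2 : c.toNat = c'.toNat + 1 := by omega
          rw [h2, List.replicate_succ]
        rw [show tol - c * d = tol - d - c' * d by rw [hcc]; ring,
          show rem + 1 - c.toNat = rem - c'.toNat by omega, hrepl]
        simp only [List.cons_append, ← hdref]
    · -- tolerance below d: zero placements, move to j+1
      have hfd0 : PySem.Int.floordiv tol d = 0 := by
        rw [PySem.Int.floordiv_eq_ediv_of_pos hdpos]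
        exact Int.ediv_eq_zero_of_lt htol (by omega)
      have hstep : fspec A s k j tol (rem + 1) = fspec A s k (j + 1) tol (rem + 1) := by
        rw [fspec]
        simp only [← hdref]
        rw [dif_pos ⟨hjk, by omega⟩, if_neg hd]
      have hc0 : (min (PySem.Int.floordiv tol d) (((rem : Nat) + 1 : Nat) : Int)).toNat = 0 := by
        rw [hfd0]; omega
      rw [hstep, hc0, hfd0]
      rw [show min (0 : Int) (((rem + 1 : Nat)) : Int) = 0 by omega]
      norm_num

lemma loopB_f (A : List Int) (m : Int) (k : Nat) (n : Int)
    (hd : ∀ j', j' < k → 1 ≤ A.getD j' 0 - m) :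
    ∀ (N j : Nat) (i tol : Int) (acc : List Int), k - j ≤ N →
      (loopB A m k n j i tol acc).1
          ++ List.replicate (n - (loopB A m k n j i tol acc).2).toNat (k : Int)
        = acc ++ fspec A m k j tol (n - i).toNat := by
  intro N
  induction N with
  | zero =>
    intro j i tol acc hN
    have hjk : ¬ j < k := by omega
    rw [loopB, fspec]
    simp [hjk]
  | succ N ih =>
    intro j i tol acc hN
    by_cases hjk : j < k
    · by_cases hni : n ≤ i
      · have h0 : (n - i).toNat = 0 := by omega
        rw [loopB, dif_pos hjk, if_pos hni, fspec, h0]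
        simp
      · set d := A.getD j 0 - m with hdref
        have hd1 : 1 ≤ d := hd j hjk
        by_cases hdt : d ≤ tol
        · set c := min (PySem.Int.floordiv tol d) (n - i) with hc
          have hfd1 : 1 ≤ PySem.Int.floordiv tol d := by
            rw [PySem.Int.le_floordiv_iff_mul_le (by omega)]; omega
          have hni' : i < n := by omega
          have hremc : ((n - i).toNat : Int) = n - i := by omega
          have hstep : loopB A m k n j i tol acc
              = loopB A m k n (j + 1) (i + c) (tol - c * d)
                  (acc ++ List.replicate c.toNat (j : Int)) := by
            rw [loopB, dif_pos hjk, if_neg hni]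
            simp only [← hdref]
            rw [if_pos hdt, ← hc]
          have hbatch := fspec_batch A m k (n - i).toNat j tol hjk (by omega) (by omega) hd1
          rw [hstep, ih (j + 1) (i + c) (tol - c * d) _ (by omega), hbatch]
          simp only [← hdref, hremc, ← hc]
          have h1 : (n - (i + c)).toNat = (n - i).toNat - c.toNat := by omega
          rw [h1]
          simp
        · have hstep : loopB A m k n j i tol acc = loopB A m k n (j + 1) i tol acc := by
            rw [loopB, dif_pos hjk, if_neg hni]
            simp only [← hdref]
            rw [if_neg hdt]
          have hfs : fspec A m k j tol (n - i).toNat = fspec A m k (j + 1) tol (n - i).toNat := by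
            rw [fspec]
            simp only [← hdref]
            rw [dif_pos ⟨hjk, by omega⟩, if_neg hdt]
          rw [hstep, ih (j + 1) i tol acc (by omega), hfs]
    · rw [loopB, dif_neg hjk, fspec]
      simp [hjk]

-- ===== VERDICT (by name: the statement is the Claim_ definition above) =====
theorem solve_spec : Claim_equal_solve := by
  unfold Claim_equal_solve
  intro R A _ hPre
  unfold Spec_solve
  obtain ⟨hne, -⟩ := hPre
  match A with
  | [] => exact absurd rfl hne
  | a :: t =>
    obtain ⟨k, hscan, hk, hgd, hlt⟩ := scan_props a t
    set M := t.foldl min a with hM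
    set n := PySem.Int.floordiv R M with hn
    set tol := PySem.Int.mod R M with htol
    have hsolve : solve R (a :: t) = loopA (a :: t) M k 0 0 tol (List.replicate n.toNat (k : Int)) := by
      unfold solve
      rw [hscan]
    have hmin : PySem.List.min? (a :: t) (fun x => x) = some M := PySem.List.min?_id_cons a t
    have hidx : PySem.List.index? (a :: t) M = some k :=
      index?_first (a :: t) M k hk hgd (fun j hj => ne_of_gt (hlt j hj))
    have halt : solve_alt R (a :: t) =
        (loopB (a :: t) M k n 0 0 tol []).1
          ++ List.replicate (n - (loopB (a :: t) M k n 0 0 tol []).2).toNat (k : Int) := by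
      unfold solve_alt
      rw [hmin]
      simp only [hidx, Option.getD_some]
      rw [← hn, ← htol]
    have hd : ∀ j', j' < k → 1 ≤ (a :: t).getD j' 0 - M := fun j' hj' => by
      have := hlt j' hj'; omega
    have hB := loopB_f (a :: t) M k n hd k 0 0 tol [] (by omega)
    have hA := loopA_eq_f (a :: t) M k ((k - 0) + n.toNat) 0 tol n.toNat [] (le_refl _)
    simp only [List.length_nil, List.nil_append] at hA hB
    rw [hsolve, halt, hA, hB]
    have : (n - 0).toNat = n.toNat := by omega
    rw [this]
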